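-- pv_equiv track=rewrite | github.com/swiftlang/swift | utils/gyb_syntax_support/Token.py | lowercase_first_word
-- ===== SOURCE A (Python) =====
-- def lowercase_first_word(name):
--     """
--     Lowercases the first word in the provided camelCase or PascalCase string.
--     EOF -> eof
--     IfKeyword -> ifKeyword
--     EOFToken -> eofToken
--     """
--     word_index = 0
--     threshold_index = 1
--     for c in name:
--         if c.islower():
--             if word_index > threshold_index:
--                 word_index -= 1
--             break
--         word_index += 1
--     if word_index == 0:
--         return name
--     return name[:word_index].lower() + name[word_index:]
-- ===== SOURCE B (Python) =====
-- def _lower_run(s):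
--     """Lowercases a leading run of non-lowercase characters, but leaves the
--     last character of the run as-is when a lowercase character follows it
--     (it starts the next word). Called with s nonempty and s[0] not lowercase."""
--     if len(s) == 1:
--         return s.lower()
--     if s[1].islower():
--         return s
--     return s[0].lower() + _lower_run(s[1:])
--
--
-- def lowercase_first_word(name):
--     """
--     Lowercases the first word in the provided camelCase or PascalCase string.
--     EOF -> eof
--     IfKeyword -> ifKeyword
--     EOFToken -> eofToken
--     """
--     if not name:
--         return name
--     if name[0].islower():
--         return name
--     if len(name) == 1 or name[1].islower():
--         return name[0].lower() + name[1:]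
--     return name[0].lower() + _lower_run(name[1:])
-- ===== Notes on version B (the rewrite author's own statement) =====
-- stated objective: alternative
-- what changed: Replaces A's counter-mutating scan (word_index/threshold_index with break, then slice+lower+concat) by a structural recursion that rebuilds the string character by character: a helper recursively lowercases the leading non-lowercase run, leaving the character that precedes the first lowercase one untouched; no indices or slices are used.
import Mathlib
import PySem

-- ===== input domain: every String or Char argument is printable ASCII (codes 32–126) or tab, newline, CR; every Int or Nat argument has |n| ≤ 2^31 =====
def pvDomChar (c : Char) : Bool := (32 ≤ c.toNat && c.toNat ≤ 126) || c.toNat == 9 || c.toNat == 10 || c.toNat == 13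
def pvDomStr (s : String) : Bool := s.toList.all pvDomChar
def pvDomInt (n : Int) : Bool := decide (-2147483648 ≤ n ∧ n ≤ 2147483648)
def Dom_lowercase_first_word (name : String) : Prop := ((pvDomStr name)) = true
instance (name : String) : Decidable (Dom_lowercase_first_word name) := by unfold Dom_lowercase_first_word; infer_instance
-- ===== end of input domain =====

-- B replaces A's counter-mutating scan-with-break and slice arithmetic by a structural
-- recursion that rebuilds the string character by character (objective: alternative, same cost).


-- ===== PORT A =====
-- the for-loop with break: wi is word_index, threshold_index = 1 is inlined
def lfwLoopA : List Char → Nat → Nat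
  | [], wi => wi
  | c :: cs, wi =>
    if PySem.Chars.islower c then (if wi > 1 then wi - 1 else wi)
    else lfwLoopA cs (wi + 1)

def lowercase_first_word (name : String) : String :=
  let wi := lfwLoopA name.toList 0
  if wi = 0 then name
  else PySem.Str.lower (PySem.Str.slice name none (some (wi : Int))) ++
       PySem.Str.slice name (some (wi : Int)) none

-- ===== PORT B =====
-- _lower_run: lowercases a leading run of non-lowercase chars, leaving the last char of the
-- run untouched when a lowercase char follows it; structural recursion on the char list
def lfwRun : List Char → List Char
  | [] => []          -- unreachable: called on nonempty strings only
  | [c] => PySem.Chars.lower [c]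
  | c :: d :: rest =>
    if PySem.Chars.islower d then c :: d :: rest
    else PySem.Chars.lower [c] ++ lfwRun (d :: rest)

def lowercase_first_word_alt (name : String) : String :=
  match name.toList with
  | [] => name
  | c :: rest =>
    if PySem.Chars.islower c then name
    else
      match rest with
      | [] => String.ofList (PySem.Chars.lower [c] ++ rest)
      | d :: _ =>
        if PySem.Chars.islower d then String.ofList (PySem.Chars.lower [c] ++ rest)
        else String.ofList (PySem.Chars.lower [c] ++ lfwRun rest)

-- ===== PRECONDITION & SPEC =====
def Spec_lowercase_first_word (name : String) (out : String) : Prop := out = lowercase_first_word_alt name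
instance (name : String) (out : String) : Decidable (Spec_lowercase_first_word name out) := by unfold Spec_lowercase_first_word; infer_instance

-- ===== CLAIM (what is proved, stated in full; the proofs are below) =====
def Claim_equal_lowercase_first_word : Prop := ∀ (name : String), Dom_lowercase_first_word name → Spec_lowercase_first_word name (lowercase_first_word name)

-- ===== LEMMAS AND PROOFS =====

-- A's loop, generalized over the accumulator: it returns k + j (minus 1 past the threshold)
-- where j is the index of the first lowercase char, or k + length if there is none.
theorem lfwLoopA_eq (cs : List Char) (k : Nat) :
    lfwLoopA cs k =
      match cs.findIdx? (fun c => PySem.Chars.islower c) with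
      | none => k + cs.length
      | some j => if k + j > 1 then k + j - 1 else k + j := by
  induction cs generalizing k with
  | nil => simp [lfwLoopA]
  | cons c cs ih =>
    by_cases h : PySem.Chars.islower c
    · simp [lfwLoopA, h, List.findIdx?_cons]
    · cases hf : cs.findIdx? (fun c => PySem.Chars.islower c) with
      | none => simp [lfwLoopA, h, List.findIdx?_cons, hf, ih (k + 1)]; ac_rfl
      | some j =>
        simp [lfwLoopA, h, List.findIdx?_cons, hf, ih (k + 1)]
        have e : k + 1 + j = k + (j + 1) := by ac_rfl
        rw [e]

-- B's helper characterized: on a run starting with a non-lowercase char it lowercases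
-- everything strictly before the char preceding the first lowercase char (all of it if none).
theorem lfwRun_eq (rest : List Char) (c : Char) (hc : ¬ PySem.Chars.islower c) :
    lfwRun (c :: rest) =
      match (c :: rest).findIdx? (fun x => PySem.Chars.islower x) with
      | none => PySem.Chars.lower (c :: rest)
      | some j => PySem.Chars.lower ((c :: rest).take (j - 1)) ++ (c :: rest).drop (j - 1) := by
  induction rest generalizing c with
  | nil => simp [lfwRun, List.findIdx?_cons, hc]
  | cons d rs ih =>
    by_cases hd : PySem.Chars.islower d
    · simp [lfwRun, hd, List.findIdx?_cons, hc, PySem.Chars.lower]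
    · rw [lfwRun]
      rw [if_neg hd, ih d hd]
      cases hf : (d :: rs).findIdx? (fun x => PySem.Chars.islower x) with
      | none =>
        have hfc : (c :: d :: rs).findIdx? (fun x => PySem.Chars.islower x) = none := by
          rw [List.findIdx?_cons]; simp [hc, hf]
        simp [hfc, PySem.Chars.lower]
      | some j =>
        have hj : 1 ≤ j := by
          rw [List.findIdx?_cons] at hf
          simp [hd] at hf
          rcases hf with ⟨j', _, rfl⟩; omega
        have hfc : (c :: d :: rs).findIdx? (fun x => PySem.Chars.islower x) = some (j + 1) := by
          rw [List.findIdx?_cons]; simp [hc, hf]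
        rw [hfc]
        simp only [Nat.add_sub_cancel]
        rw [show j = (j - 1) + 1 from (Nat.succ_pred_eq_of_pos hj).symm]
        simp [PySem.Chars.lower, List.take_succ_cons, List.drop_succ_cons]

-- ===== VERDICT (by name: the statement is the Claim_ definition above) =====
theorem lowercase_first_word_spec : Claim_equal_lowercase_first_word := by
  intro name _
  show lowercase_first_word name = lowercase_first_word_alt name
  unfold lowercase_first_word lowercase_first_word_alt
  rw [lfwLoopA_eq]
  cases hl : name.toList with
  | nil => simp
  | cons c rest =>
    by_cases hc : PySem.Chars.islower c
    · simp [List.findIdx?_cons, hc]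
    · cases rest with
      | nil =>
        simp only [List.findIdx?_cons, hc, Bool.false_eq_true, if_false,
          List.findIdx?_nil, Option.map_none]
        apply String.toList_inj.mp
        simp [hl, PySem.List.slice_to, PySem.List.slice_from]
      | cons d rs =>
        by_cases hd : PySem.Chars.islower d
        · simp only [List.findIdx?_cons, hc, hd, Bool.false_eq_true, if_false, if_true,
            Option.map_some, Nat.zero_add]
          apply String.toList_inj.mp
          simp [hl, PySem.List.slice_to, PySem.List.slice_from, PySem.Chars.lower]
        · cases hf : (d :: rs).findIdx? (fun x => PySem.Chars.islower x) with
          | none =>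
            have hfc : (c :: d :: rs).findIdx? (fun x => PySem.Chars.islower x) = none := by
              rw [List.findIdx?_cons]; simp [hc, hf]
            simp only [hfc]
            apply String.toList_inj.mp
            simp only [lfwRun_eq rs d hd, hf]
            rw [if_neg (show ¬ (0 + (c :: d :: rs).length = 0) from by simp)]
            simp only [String.toList_append, PySem.Str.lower, PySem.Str.slice,
              String.toList_ofList, PySem.Chars.slice, hl, hc, hd, Bool.false_eq_true, if_false]
            rw [PySem.List.slice_to_natCast, PySem.List.slice_from_natCast]
            simp [PySem.Chars.lower, List.take_of_length_le, List.drop_eq_nil_of_le]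
          | some j =>
            have hj : 0 < j := by
              rw [List.findIdx?_cons] at hf
              simp [hd] at hf
              rcases hf with ⟨j', _, rfl⟩; omega
            have hfc : (c :: d :: rs).findIdx? (fun x => PySem.Chars.islower x) = some (j + 1) := by
              rw [List.findIdx?_cons]; simp [hc, hf]
            simp only [hfc]
            apply String.toList_inj.mp
            simp only [lfwRun_eq rs d hd, hf]
            rw [show (0:Nat) + (j + 1) = j + 1 from by omega]
            rw [if_pos (show j + 1 > 1 by omega), if_neg (show ¬ (j + 1 - 1 = 0) by omega)]
            rw [show j + 1 - 1 = (j - 1) + 1 from by omega]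
            simp only [String.toList_append, PySem.Str.lower, PySem.Str.slice,
              String.toList_ofList, PySem.Chars.slice, hl, hc, hd, Bool.false_eq_true, if_false]
            rw [PySem.List.slice_to_natCast, PySem.List.slice_from_natCast]
            simp [PySem.Chars.lower, List.take_succ_cons, List.drop_succ_cons, List.map_take]
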